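-- pv_equiv track=rewrite | github.com/DOI-USGS/gems-tools-pro | Scripts/GeMS_TopologyCheck_AGP2.py | isFlippedNode
-- ===== SOURCE A (Python) =====
-- def isFlippedNode(NodeTypes):
--     # NodeTypes is a list of 'TO', 'FROM'
--     nTo = 0
--     nFrom = 0
--     for nd in NodeTypes:
--         if nd == 'TO': nTo = nTo+1
--         elif nd == 'FROM': nFrom = nFrom+1
--     if abs(nTo-nFrom) > 0:
--         return True
--     else:
--         return False
-- ===== SOURCE B (Python) =====
-- def isFlippedNode(NodeTypes):
--     # NodeTypes is a list of 'TO', 'FROM'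
--     # Cancel opposite tags against a stack (bracket-matching style):
--     # a residue remains exactly when the TO/FROM counts differ.
--     stack = []
--     for nd in NodeTypes:
--         if nd == 'TO' or nd == 'FROM':
--             if stack and stack[-1] != nd:
--                 stack.pop()
--             else:
--                 stack.append(nd)
--     return len(stack) > 0
-- ===== Notes on version B (the rewrite author's own statement) =====
-- stated objective: alternative
-- what changed: Replaces the two-counter accumulation and abs comparison by a stack-cancellation pass (bracket-matching style): each TO/FROM pops an opposite tag from a stack or pushes itself, and the result is whether a residue remains; no counters or arithmetic at all.
import Mathlib
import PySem

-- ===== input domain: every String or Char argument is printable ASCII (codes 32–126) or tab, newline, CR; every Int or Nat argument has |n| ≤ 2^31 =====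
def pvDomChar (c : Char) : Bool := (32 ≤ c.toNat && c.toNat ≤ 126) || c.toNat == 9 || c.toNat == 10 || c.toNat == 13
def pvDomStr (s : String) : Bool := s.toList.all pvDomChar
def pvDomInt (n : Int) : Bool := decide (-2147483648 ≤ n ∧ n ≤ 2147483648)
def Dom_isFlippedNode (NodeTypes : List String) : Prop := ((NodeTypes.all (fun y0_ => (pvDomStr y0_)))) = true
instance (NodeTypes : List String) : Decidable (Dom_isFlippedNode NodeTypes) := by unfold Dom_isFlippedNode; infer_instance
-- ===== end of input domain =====

-- B replaces A's two-counter accumulation by a stack-cancellation pass (bracket-matching style): alternative, same cost.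

-- ===== PORT A =====
-- literal port of A: one pass accumulating the pair (nTo, nFrom), then abs(nTo-nFrom) > 0
def isFlippedNode (NodeTypes : List String) : Bool :=
  let counts := NodeTypes.foldl
    (fun (acc : Int × Int) nd =>
      if nd == "TO" then (acc.1 + 1, acc.2)
      else if nd == "FROM" then (acc.1, acc.2 + 1)
      else acc)
    (0, 0)
  if |counts.1 - counts.2| > 0 then true else false

-- ===== PORT B =====
-- loop body of B: a TO/FROM tag pops an opposite tag off the stack, otherwise pushes itself
-- (stack top = list head; Python appends/pops at the end, same stack discipline)
def pvStep (st : List String) (nd : String) : List String :=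
  if nd == "TO" || nd == "FROM" then
    match st with
    | top :: rest => if top != nd then rest else nd :: top :: rest
    | [] => [nd]
  else st

-- literal port of B: fold the cancellation step over the list, then ask whether a residue remains
def isFlippedNode_alt (NodeTypes : List String) : Bool :=
  let stack := NodeTypes.foldl pvStep []
  stack.length > 0

-- ===== PRECONDITION & SPEC =====
def Spec_isFlippedNode (NodeTypes : List String) (out : Bool) : Prop := out = isFlippedNode_alt NodeTypes
instance (NodeTypes : List String) (out : Bool) : Decidable (Spec_isFlippedNode NodeTypes out) := by unfold Spec_isFlippedNode; infer_instance

-- ===== CLAIM (what is proved, stated in full; the proofs are below) =====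
def Claim_equal_isFlippedNode : Prop := ∀ (NodeTypes : List String), Dom_isFlippedNode NodeTypes → Spec_isFlippedNode NodeTypes (isFlippedNode NodeTypes)

-- ===== LEMMAS AND PROOFS =====

-- A's fold accumulates exactly the counts of "TO" and "FROM"
theorem isFlippedNode_fold_counts (NodeTypes : List String) (a b : Int) :
    NodeTypes.foldl
      (fun (acc : Int × Int) nd =>
        if nd == "TO" then (acc.1 + 1, acc.2)
        else if nd == "FROM" then (acc.1, acc.2 + 1)
        else acc)
      (a, b)
    = (a + NodeTypes.count "TO", b + NodeTypes.count "FROM") := by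
  induction NodeTypes generalizing a b with
  | nil => simp
  | cons hd tl ih =>
    simp only [List.foldl_cons]
    by_cases h1 : hd = "TO"
    · rw [if_pos (by simp [h1]), ih]
      simp [h1, List.count_cons]
      ring
    · by_cases h2 : hd = "FROM"
      · rw [if_neg (by simp [h1]), if_pos (by simp [h2]), ih]
        simp [h1, h2, List.count_cons]
        ring
      · rw [if_neg (by simp [h1]), if_neg (by simp [h2]), ih]
        simp [h1, h2, List.count_cons]

-- canonical stack for a running balance d = (#TO seen so far) - (#FROM seen so far):
-- the stack is always homogeneous, |d| copies of the majority tag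
def pvCanon (d : Int) : List String :=
  if 0 ≤ d then List.replicate d.toNat "TO" else List.replicate (-d).toNat "FROM"

theorem pvStep_canon_TO (d : Int) : pvStep (pvCanon d) "TO" = pvCanon (d + 1) := by
  rcases lt_trichotomy d 0 with h | h | h
  · have e1 : pvCanon d = "FROM" :: List.replicate ((-d).toNat - 1) "FROM" := by
      unfold pvCanon; rw [if_neg (by omega)]
      conv_lhs => rw [show (-d).toNat = ((-d).toNat - 1) + 1 by omega]
      rw [List.replicate_succ]
    have e2 : pvCanon (d + 1) = if 0 ≤ d + 1 then List.replicate ((d+1).toNat) "TO" else List.replicate ((-d).toNat - 1) "FROM" := by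
      unfold pvCanon
      by_cases h2 : 0 ≤ d + 1
      · simp [h2]
      · rw [if_neg h2, if_neg h2]; congr 1; omega
    rw [e1, e2]
    by_cases h2 : 0 ≤ d + 1
    · rw [if_pos h2]
      have : d = -1 := by omega
      subst this
      simp [pvStep]
    · rw [if_neg h2]; simp [pvStep]
  · subst h; simp [pvStep, pvCanon]
  · have e1 : pvCanon d = "TO" :: List.replicate (d.toNat - 1) "TO" := by
      unfold pvCanon; rw [if_pos (by omega)]
      conv_lhs => rw [show d.toNat = (d.toNat - 1) + 1 by omega]
      rw [List.replicate_succ]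
    have e2 : pvCanon (d + 1) = "TO" :: "TO" :: List.replicate (d.toNat - 1) "TO" := by
      unfold pvCanon; rw [if_pos (by omega)]
      rw [show (d+1).toNat = ((d.toNat - 1) + 1) + 1 by omega]
      rw [List.replicate_succ, List.replicate_succ]
    rw [e1, e2]; simp [pvStep]

theorem pvStep_canon_FROM (d : Int) : pvStep (pvCanon d) "FROM" = pvCanon (d - 1) := by
  rcases lt_trichotomy d 0 with h | h | h
  · have e1 : pvCanon d = "FROM" :: List.replicate ((-d).toNat - 1) "FROM" := by
      unfold pvCanon; rw [if_neg (by omega)]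
      conv_lhs => rw [show (-d).toNat = ((-d).toNat - 1) + 1 by omega]
      rw [List.replicate_succ]
    have e2 : pvCanon (d - 1) = "FROM" :: "FROM" :: List.replicate ((-d).toNat - 1) "FROM" := by
      unfold pvCanon; rw [if_neg (by omega)]
      rw [show (-(d-1)).toNat = (((-d).toNat - 1) + 1) + 1 by omega]
      rw [List.replicate_succ, List.replicate_succ]
    rw [e1, e2]; simp [pvStep]
  · subst h
    have e2 : pvCanon (0 - 1) = ["FROM"] := by
      unfold pvCanon; rw [if_neg (by omega)]; norm_num
    rw [e2]; simp [pvStep, pvCanon]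
  · have e1 : pvCanon d = "TO" :: List.replicate (d.toNat - 1) "TO" := by
      unfold pvCanon; rw [if_pos (by omega)]
      conv_lhs => rw [show d.toNat = (d.toNat - 1) + 1 by omega]
      rw [List.replicate_succ]
    have e2 : pvCanon (d - 1) = List.replicate (d.toNat - 1) "TO" := by
      unfold pvCanon; rw [if_pos (by omega)]; congr 1; omega
    rw [e1, e2]; simp [pvStep]

-- B's fold from a canonical stack stays canonical, tracking the balance
theorem pvFold_canon (l : List String) (d : Int) :
    l.foldl pvStep (pvCanon d)
      = pvCanon (d + (l.count "TO" : Int) - (l.count "FROM" : Int)) := by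
  induction l generalizing d with
  | nil => simp
  | cons hd tl ih =>
    simp only [List.foldl_cons]
    by_cases h1 : hd = "TO"
    · subst h1
      rw [pvStep_canon_TO, ih]
      simp only [List.count_cons_self]
      congr 1
      have h' : List.count "FROM" ("TO"::tl) = List.count "FROM" tl := by simp
      rw [h']; push_cast; ring
    · by_cases h2 : hd = "FROM"
      · subst h2
        rw [pvStep_canon_FROM, ih]
        simp only [List.count_cons_self]
        congr 1
        have h' : List.count "TO" ("FROM"::tl) = List.count "TO" tl := by simp
        rw [h']; push_cast; ring
      · have : pvStep (pvCanon d) hd = pvCanon d := by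
          unfold pvStep; rw [if_neg (by simp [h1, h2])]
        rw [this, ih]
        simp [List.count_cons, h1, h2]

theorem pvCanon_len_pos (d : Int) : ((pvCanon d).length > 0) = (d ≠ 0) := by
  unfold pvCanon
  by_cases hd : 0 ≤ d <;> simp [hd] <;> omega

-- ===== VERDICT (by name: the statement is the Claim_ definition above) =====
theorem isFlippedNode_spec : Claim_equal_isFlippedNode := by
  intro NodeTypes _
  unfold Spec_isFlippedNode isFlippedNode isFlippedNode_alt
  rw [isFlippedNode_fold_counts]
  have hB : NodeTypes.foldl pvStep []
      = pvCanon ((NodeTypes.count "TO" : Int) - (NodeTypes.count "FROM" : Int)) := by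
    have h0 : pvCanon 0 = [] := by simp [pvCanon]
    have := pvFold_canon NodeTypes 0
    rw [h0] at this
    rw [this]; congr 1; ring
  rw [hB]
  by_cases he : ((NodeTypes.count "TO" : Int) - (NodeTypes.count "FROM" : Int)) = 0
  · have : (pvCanon ((NodeTypes.count "TO" : Int) - (NodeTypes.count "FROM" : Int))).length = 0 := by
      rw [he]; simp [pvCanon]
    simp [this, he, pvCanon]
  · have hlen : (pvCanon ((NodeTypes.count "TO" : Int) - (NodeTypes.count "FROM" : Int))).length > 0 := by
      rw [pvCanon_len_pos]; exact he
    simp only [zero_add]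
    rw [if_pos (by rw [gt_iff_lt, abs_pos]; exact he)]
    simp [hlen]
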